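-- pv_equiv track=rewrite | github.com/Saswatsusmoy/Finance-Research | web_server.py | generate_article_url
-- ===== SOURCE A (Python) =====
-- def generate_article_url(source, title, index):
--     """Generate realistic article URLs based on source and title"""
--     # Convert title to URL-friendly format
--     url_title = title.lower().replace(' ', '-').replace(',', '').replace(':', '').replace('%', 'percent')
--     url_title = ''.join(c for c in url_title if c.isalnum() or c in '-')
--
--     # Generate URLs based on actual news source patterns
--     source_urls = {
--         'Reuters': f"https://www.reuters.com/business/{url_title}-{index}",
--         'Bloomberg': f"https://www.bloomberg.com/news/articles/{url_title}",
--         'CNBC': f"https://www.cnbc.com/2024/12/14/{url_title}.html",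
--         'MarketWatch': f"https://www.marketwatch.com/story/{url_title}-{index}",
--         'Financial Times': f"https://www.ft.com/content/{url_title}",
--         'TechCrunch': f"https://techcrunch.com/2024/12/14/{url_title}/",
--         'CoinDesk': f"https://www.coindesk.com/business/2024/12/14/{url_title}",
--         'Decrypt': f"https://decrypt.co/{url_title}",
--         'Wall Street Journal': f"https://www.wsj.com/articles/{url_title}-{index}",
--         'Barron\'s': f"https://www.barrons.com/articles/{url_title}-{index}"
--     }
--
--     return source_urls.get(source, f"https://example.com/news/{url_title}")
-- ===== SOURCE B (Python) =====
-- def generate_article_url(source, title, index):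
--     """Generate realistic article URLs based on source and title"""
--     # Build the URL slug in a single pass over the lowered title.
--     parts = []
--     for c in title.lower():
--         if c == ' ':
--             parts.append('-')
--         elif c == '%':
--             parts.append('percent')
--         elif c.isalnum() or c == '-':
--             parts.append(c)
--         # everything else (commas, colons, other punctuation) is dropped
--     url_title = ''.join(parts)
--
--     if source == 'Reuters':
--         return f"https://www.reuters.com/business/{url_title}-{index}"
--     elif source == 'Bloomberg':
--         return f"https://www.bloomberg.com/news/articles/{url_title}"
--     elif source == 'CNBC':
--         return f"https://www.cnbc.com/2024/12/14/{url_title}.html"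
--     elif source == 'MarketWatch':
--         return f"https://www.marketwatch.com/story/{url_title}-{index}"
--     elif source == 'Financial Times':
--         return f"https://www.ft.com/content/{url_title}"
--     elif source == 'TechCrunch':
--         return f"https://techcrunch.com/2024/12/14/{url_title}/"
--     elif source == 'CoinDesk':
--         return f"https://www.coindesk.com/business/2024/12/14/{url_title}"
--     elif source == 'Decrypt':
--         return f"https://decrypt.co/{url_title}"
--     elif source == 'Wall Street Journal':
--         return f"https://www.wsj.com/articles/{url_title}-{index}"
--     elif source == "Barron's":
--         return f"https://www.barrons.com/articles/{url_title}-{index}"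
--     else:
--         return f"https://example.com/news/{url_title}"
-- ===== Notes on version B (the rewrite author's own statement) =====
-- stated objective: simpler
-- what changed: The four chained .replace() passes plus a filtering join (several passes over the title) are fused into one single pass that maps each character directly to its slug fragment, and the dict built on every call is replaced by a direct if/elif dispatch on the source.
import Mathlib
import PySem

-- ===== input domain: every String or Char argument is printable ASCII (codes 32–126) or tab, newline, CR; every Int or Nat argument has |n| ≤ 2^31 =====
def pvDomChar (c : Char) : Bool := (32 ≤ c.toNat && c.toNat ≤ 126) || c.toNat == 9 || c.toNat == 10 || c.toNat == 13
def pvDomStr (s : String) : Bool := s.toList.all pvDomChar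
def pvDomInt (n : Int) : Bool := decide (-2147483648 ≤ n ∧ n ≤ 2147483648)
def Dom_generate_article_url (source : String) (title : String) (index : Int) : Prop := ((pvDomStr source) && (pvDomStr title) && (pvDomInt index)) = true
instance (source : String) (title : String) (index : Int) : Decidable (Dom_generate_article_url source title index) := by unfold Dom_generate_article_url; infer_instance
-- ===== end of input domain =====

-- B fuses A's four chained .replace() passes + filtering join into one per-character pass,
-- and replaces the per-call dict with a direct if/elif dispatch on the source (objective: simpler).

-- ===== PORT A =====
def generate_article_url (source : String) (title : String) (index : Int) : String :=
  -- url_title = title.lower().replace(' ', '-').replace(',', '').replace(':', '').replace('%', 'percent')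
  let url_title0 : String :=
    PySem.Str.replace (PySem.Str.replace (PySem.Str.replace (PySem.Str.replace
      (PySem.Str.lower title) " " "-") "," "") ":" "") "%" "percent"
  -- ''.join(c for c in url_title if c.isalnum() or c in '-')  (c in '-' is c == '-' for a single char)
  let url_title : String :=
    String.ofList (url_title0.toList.filter (fun c => PySem.Chars.isalnum c || c == '-'))
  let source_urls : PySem.Dict String String := PySem.Dict.mk [
    ("Reuters", "https://www.reuters.com/business/" ++ url_title ++ "-" ++ PySem.Int.toStr index),
    ("Bloomberg", "https://www.bloomberg.com/news/articles/" ++ url_title),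
    ("CNBC", "https://www.cnbc.com/2024/12/14/" ++ url_title ++ ".html"),
    ("MarketWatch", "https://www.marketwatch.com/story/" ++ url_title ++ "-" ++ PySem.Int.toStr index),
    ("Financial Times", "https://www.ft.com/content/" ++ url_title),
    ("TechCrunch", "https://techcrunch.com/2024/12/14/" ++ url_title ++ "/"),
    ("CoinDesk", "https://www.coindesk.com/business/2024/12/14/" ++ url_title),
    ("Decrypt", "https://decrypt.co/" ++ url_title),
    ("Wall Street Journal", "https://www.wsj.com/articles/" ++ url_title ++ "-" ++ PySem.Int.toStr index),
    ("Barron's", "https://www.barrons.com/articles/" ++ url_title ++ "-" ++ PySem.Int.toStr index)]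
  source_urls.getD source ("https://example.com/news/" ++ url_title)

-- ===== PORT B =====
-- single pass over the lowered title: ' ' → '-', '%' → "percent", keep alnum and '-', drop the rest
def pvSlugGo : List Char → List Char
  | [] => []
  | c :: t =>
    if c == ' ' then '-' :: pvSlugGo t
    else if c == '%' then "percent".toList ++ pvSlugGo t
    else if PySem.Chars.isalnum c || c == '-' then c :: pvSlugGo t
    else pvSlugGo t

def generate_article_url_alt (source : String) (title : String) (index : Int) : String :=
  let url_title : String := String.ofList (pvSlugGo (PySem.Chars.lower title.toList))
  if source == "Reuters" then "https://www.reuters.com/business/" ++ url_title ++ "-" ++ PySem.Int.toStr index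
  else if source == "Bloomberg" then "https://www.bloomberg.com/news/articles/" ++ url_title
  else if source == "CNBC" then "https://www.cnbc.com/2024/12/14/" ++ url_title ++ ".html"
  else if source == "MarketWatch" then "https://www.marketwatch.com/story/" ++ url_title ++ "-" ++ PySem.Int.toStr index
  else if source == "Financial Times" then "https://www.ft.com/content/" ++ url_title
  else if source == "TechCrunch" then "https://techcrunch.com/2024/12/14/" ++ url_title ++ "/"
  else if source == "CoinDesk" then "https://www.coindesk.com/business/2024/12/14/" ++ url_title
  else if source == "Decrypt" then "https://decrypt.co/" ++ url_title
  else if source == "Wall Street Journal" then "https://www.wsj.com/articles/" ++ url_title ++ "-" ++ PySem.Int.toStr index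
  else if source == "Barron's" then "https://www.barrons.com/articles/" ++ url_title ++ "-" ++ PySem.Int.toStr index
  else "https://example.com/news/" ++ url_title

-- ===== PRECONDITION & SPEC =====
def Spec_generate_article_url (source : String) (title : String) (index : Int) (out : String) : Prop := out = generate_article_url_alt source title index
instance (source : String) (title : String) (index : Int) (out : String) : Decidable (Spec_generate_article_url source title index out) := by unfold Spec_generate_article_url; infer_instance

-- ===== CLAIM (what is proved, stated in full; the proofs are below) =====
def Claim_equal_generate_article_url : Prop := ∀ (source : String) (title : String) (index : Int), Dom_generate_article_url source title index → Spec_generate_article_url source title index (generate_article_url source title index)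

-- ===== LEMMAS AND PROOFS =====

-- the filter predicate A applies
def pvKeep (c : Char) : Bool := PySem.Chars.isalnum c || c == '-'

-- what the composed replace/filter pipeline contributes for one character
def pvSlugChar (c : Char) : List Char :=
  if c == ' ' then ['-']
  else if c == '%' then "percent".toList
  else if pvKeep c then [c] else []

-- replace with a single-char pattern is a flatMap
theorem pv_go_single (a : Char) (new : List Char) :
    ∀ (fuel : Nat) (l acc : List Char), l.length ≤ fuel →
      PySem.Chars.replace.go [a] new fuel l acc
        = acc.reverse ++ l.flatMap (fun c => if c == a then new else [c]) := by
  intro fuel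
  induction fuel with
  | zero =>
      intro l acc h
      cases l with
      | nil => simp [PySem.Chars.replace.go]
      | cons c t => simp at h
  | succ n ih =>
      intro l acc h
      cases l with
      | nil => simp [PySem.Chars.replace.go]
      | cons c t =>
          have ht : t.length ≤ n := by simp at h; omega
          simp only [PySem.Chars.replace.go]
          by_cases hc : c = a
          · subst hc
            have hp : ([c].isPrefixOf (c :: t)) = true := by simp [List.isPrefixOf]
            rw [hp]
            have hdrop : List.drop (List.length [c]) (c :: t) = t := rfl
            simp only [if_true, hdrop]
            rw [ih t (new.reverse ++ acc) ht]
            simp [List.flatMap_cons]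
          · have hp : ([a].isPrefixOf (c :: t)) = false := by
              simp [List.isPrefixOf]
              exact fun h' => hc h'.symm
            rw [hp]
            simp only [Bool.false_eq_true, if_false]
            rw [ih t (c :: acc) ht]
            simp [List.flatMap_cons, hc]

theorem pv_replace_single (a : Char) (new l : List Char) :
    PySem.Chars.replace l [a] new = l.flatMap (fun c => if c == a then new else [c]) := by
  have he : ([a] : List Char).isEmpty = false := rfl
  rw [PySem.Chars.replace, he]
  simpa using pv_go_single a new l.length l [] (le_refl _)

-- one character through the four replaces and the filter
theorem pv_step (c : Char) :
    (((((if c == ' ' then ['-'] else [c]).flatMap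
        (fun c => if c == ',' then [] else [c])).flatMap
        (fun c => if c == ':' then [] else [c])).flatMap
        (fun c => if c == '%' then "percent".toList else [c])).filter pvKeep)
      = pvSlugChar c := by
  by_cases h1 : c = ' '
  · subst h1; decide
  · by_cases h2 : c = ','
    · subst h2; decide
    · by_cases h3 : c = ':'
      · subst h3; decide
      · by_cases h4 : c = '%'
        · subst h4; decide
        · simp only [if_neg (by simp [h1] : ¬ (c == ' ') = true), List.flatMap_cons,
            if_neg (by simp [h2] : ¬ (c == ',') = true), List.flatMap_nil, List.append_nil,
            if_neg (by simp [h3] : ¬ (c == ':') = true),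
            if_neg (by simp [h4] : ¬ (c == '%') = true), List.filter_cons, pvSlugChar,
            List.filter_nil]

theorem pv_slugChar_append (c : Char) (t : List Char) :
    pvSlugChar c ++ pvSlugGo t = pvSlugGo (c :: t) := by
  simp only [pvSlugChar, pvSlugGo, pvKeep]
  by_cases h1 : (c == ' ') = true
  · simp [h1]
  · by_cases h2 : (c == '%') = true
    · simp [h1, h2]
    · by_cases hp : (PySem.Chars.isalnum c || c == '-') = true
      · simp [h1, h2, hp]
      · simp [h1, h2, hp]

-- the whole pipeline is B's single pass
theorem pv_slug_eq (l : List Char) :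
    ((((l.flatMap (fun c => if c == ' ' then ['-'] else [c])).flatMap
        (fun c => if c == ',' then [] else [c])).flatMap
        (fun c => if c == ':' then [] else [c])).flatMap
        (fun c => if c == '%' then "percent".toList else [c])).filter pvKeep
      = pvSlugGo l := by
  induction l with
  | nil => rfl
  | cons c t ih =>
      simp only [List.flatMap_cons, List.flatMap_append, List.filter_append, ih]
      rw [pv_step c, pv_slugChar_append]

-- the source dispatch: dict lookup = if/elif chain (u, ix symbolic)
theorem pv_dispatch (source u ix : String) :
    PySem.Dict.getD (PySem.Dict.mk [
      ("Reuters", "https://www.reuters.com/business/" ++ u ++ "-" ++ ix),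
      ("Bloomberg", "https://www.bloomberg.com/news/articles/" ++ u),
      ("CNBC", "https://www.cnbc.com/2024/12/14/" ++ u ++ ".html"),
      ("MarketWatch", "https://www.marketwatch.com/story/" ++ u ++ "-" ++ ix),
      ("Financial Times", "https://www.ft.com/content/" ++ u),
      ("TechCrunch", "https://techcrunch.com/2024/12/14/" ++ u ++ "/"),
      ("CoinDesk", "https://www.coindesk.com/business/2024/12/14/" ++ u),
      ("Decrypt", "https://decrypt.co/" ++ u),
      ("Wall Street Journal", "https://www.wsj.com/articles/" ++ u ++ "-" ++ ix),
      ("Barron's", "https://www.barrons.com/articles/" ++ u ++ "-" ++ ix)])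
      source ("https://example.com/news/" ++ u)
    = (if source == "Reuters" then "https://www.reuters.com/business/" ++ u ++ "-" ++ ix
      else if source == "Bloomberg" then "https://www.bloomberg.com/news/articles/" ++ u
      else if source == "CNBC" then "https://www.cnbc.com/2024/12/14/" ++ u ++ ".html"
      else if source == "MarketWatch" then "https://www.marketwatch.com/story/" ++ u ++ "-" ++ ix
      else if source == "Financial Times" then "https://www.ft.com/content/" ++ u
      else if source == "TechCrunch" then "https://techcrunch.com/2024/12/14/" ++ u ++ "/"
      else if source == "CoinDesk" then "https://www.coindesk.com/business/2024/12/14/" ++ u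
      else if source == "Decrypt" then "https://decrypt.co/" ++ u
      else if source == "Wall Street Journal" then "https://www.wsj.com/articles/" ++ u ++ "-" ++ ix
      else if source == "Barron's" then "https://www.barrons.com/articles/" ++ u ++ "-" ++ ix
      else "https://example.com/news/" ++ u) := by
  by_cases h1 : source = "Reuters"
  · subst h1; rfl
  by_cases h2 : source = "Bloomberg"
  · subst h2; rfl
  by_cases h3 : source = "CNBC"
  · subst h3; rfl
  by_cases h4 : source = "MarketWatch"
  · subst h4; rfl
  by_cases h5 : source = "Financial Times"
  · subst h5; rfl
  by_cases h6 : source = "TechCrunch"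
  · subst h6; rfl
  by_cases h7 : source = "CoinDesk"
  · subst h7; rfl
  by_cases h8 : source = "Decrypt"
  · subst h8; rfl
  by_cases h9 : source = "Wall Street Journal"
  · subst h9; rfl
  by_cases h10 : source = "Barron's"
  · subst h10; rfl
  have e1 : ("Reuters" == source) = false := by simp [Ne.symm h1]
  have e2 : ("Bloomberg" == source) = false := by simp [Ne.symm h2]
  have e3 : ("CNBC" == source) = false := by simp [Ne.symm h3]
  have e4 : ("MarketWatch" == source) = false := by simp [Ne.symm h4]
  have e5 : ("Financial Times" == source) = false := by simp [Ne.symm h5]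
  have e6 : ("TechCrunch" == source) = false := by simp [Ne.symm h6]
  have e7 : ("CoinDesk" == source) = false := by simp [Ne.symm h7]
  have e8 : ("Decrypt" == source) = false := by simp [Ne.symm h8]
  have e9 : ("Wall Street Journal" == source) = false := by simp [Ne.symm h9]
  have e10 : ("Barron's" == source) = false := by simp [Ne.symm h10]
  have f1 : (source == "Reuters") = false := by simp [h1]
  have f2 : (source == "Bloomberg") = false := by simp [h2]
  have f3 : (source == "CNBC") = false := by simp [h3]
  have f4 : (source == "MarketWatch") = false := by simp [h4]
  have f5 : (source == "Financial Times") = false := by simp [h5]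
  have f6 : (source == "TechCrunch") = false := by simp [h6]
  have f7 : (source == "CoinDesk") = false := by simp [h7]
  have f8 : (source == "Decrypt") = false := by simp [h8]
  have f9 : (source == "Wall Street Journal") = false := by simp [h9]
  have f10 : (source == "Barron's") = false := by simp [h10]
  simp only [PySem.Dict.getD, PySem.Dict.get?, List.find?_cons, List.find?_nil, e1, e2, e3, e4, e5, e6, e7, e8, e9, e10,
    f1, f2, f3, f4, f5, f6, f7, f8, f9, f10, Bool.false_eq_true, if_false,
    Option.map_none, Option.getD_none]

-- A's slug string is B's slug string
theorem pv_title_eq (title : String) :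
    String.ofList ((PySem.Str.replace (PySem.Str.replace (PySem.Str.replace (PySem.Str.replace
        (PySem.Str.lower title) " " "-") "," "") ":" "") "%" "percent").toList.filter
        (fun c => PySem.Chars.isalnum c || c == '-'))
      = String.ofList (pvSlugGo (PySem.Chars.lower title.toList)) := by
  have hfun : (fun c => PySem.Chars.isalnum c || c == '-') = pvKeep := rfl
  simp only [PySem.Str.replace, String.toList_ofList, PySem.Str.toList_lower, hfun]
  rw [show (" " : String).toList = [' '] from rfl, show ("-" : String).toList = ['-'] from rfl,
    show ("," : String).toList = [','] from rfl, show ("" : String).toList = [] from rfl,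
    show (":" : String).toList = [':'] from rfl, show ("%" : String).toList = ['%'] from rfl,
    show ("percent" : String).toList = "percent".toList from rfl]
  rw [pv_replace_single, pv_replace_single, pv_replace_single, pv_replace_single]
  rw [pv_slug_eq]

-- ===== VERDICT (by name: the statement is the Claim_ definition above) =====
theorem generate_article_url_spec : Claim_equal_generate_article_url := by
  intro source title index _
  unfold Spec_generate_article_url generate_article_url generate_article_url_alt
  simp only []
  rw [pv_title_eq title]
  exact pv_dispatch source (String.ofList (pvSlugGo (PySem.Chars.lower title.toList))) (PySem.Int.toStr index)
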